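-- pv_equiv track=rewrite | github.com/glygener/glygen-backend-integration | ai-ready/libgly.py | left_join_tables
-- ===== SOURCE A (Python) =====
-- def left_join_tables(tbl_a, tbl_b):
--
--     map_dict = {}
--     for i in range(0, len(tbl_b)):
--         if tbl_b[i][0] not in map_dict:
--             map_dict[tbl_b[i][0]] = []
--         map_dict[tbl_b[i][0]].append(i)
--
--     empty_row = []
--     for j in range(1, len(tbl_b[0])):
--         empty_row.append("")
--
--     tbl_c = [tbl_a[0] + tbl_b[0][1:]]
--     for row in tbl_a[1:]:
--         main_id_a = row[0]
--         if main_id_a in map_dict: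
--             for i in map_dict[main_id_a]:
--                 tbl_c.append(row + tbl_b[i][1:])
--         else:
--             tbl_c.append(row + empty_row)
--
--     return tbl_c
-- ===== SOURCE B (Python) =====
-- def left_join_tables(tbl_a, tbl_b):
--     width = len(tbl_b[0]) - 1
--     tbl_c = [tbl_a[0] + tbl_b[0][1:]]
--     for row in tbl_a[1:]:
--         matched = False
--         for b_row in tbl_b:
--             if b_row[0] == row[0]:
--                 tbl_c.append(row + b_row[1:])
--                 matched = True
--         if not matched:
--             tbl_c.append(row + [""] * width)
--     return tbl_c
-- ===== Notes on version B (the rewrite author's own statement) =====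
-- stated objective: alternative
-- what changed: Drops the prebuilt first-column index dict; B does a direct nested scan of all of tbl_b for each data row of tbl_a, with a matched flag driving the empty-row padding.
import Mathlib
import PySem

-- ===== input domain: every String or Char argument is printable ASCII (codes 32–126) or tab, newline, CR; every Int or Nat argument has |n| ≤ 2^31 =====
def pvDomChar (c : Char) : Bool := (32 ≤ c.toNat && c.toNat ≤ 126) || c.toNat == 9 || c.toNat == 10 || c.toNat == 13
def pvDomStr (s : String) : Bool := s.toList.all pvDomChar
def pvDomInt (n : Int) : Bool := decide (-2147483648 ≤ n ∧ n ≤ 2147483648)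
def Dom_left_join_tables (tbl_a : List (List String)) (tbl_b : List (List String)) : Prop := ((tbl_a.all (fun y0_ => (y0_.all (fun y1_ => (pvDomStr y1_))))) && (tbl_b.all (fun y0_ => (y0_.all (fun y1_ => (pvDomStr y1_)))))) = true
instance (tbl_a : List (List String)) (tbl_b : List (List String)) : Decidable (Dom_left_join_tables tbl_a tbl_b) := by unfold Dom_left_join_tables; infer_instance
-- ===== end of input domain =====

-- B replaces A's prebuilt first-column index dict with a direct nested scan of tbl_b per data row
-- of tbl_a (objective: alternative — same results by repeated linear scans instead of a hash index).
-- ===== PORT A =====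
-- map_dict: for i in range(len(tbl_b)): map_dict.setdefault(tbl_b[i][0], []).append(i)  (modify = get-or-default then overwrite in place)
def ljtMap (tbl_b : List (List String)) : PySem.Dict String (List Int) :=
  (PySem.List.pyRange 0 (PySem.List.len tbl_b) 1).foldl
    (fun d i => d.modify (PySem.List.pyGetD (PySem.List.pyGetD tbl_b i []) 0 "") [] (· ++ [i]))
    PySem.Dict.empty

-- empty_row: for j in range(1, len(tbl_b[0])): empty_row.append("")
def ljtEmptyRow (tbl_b : List (List String)) : List String :=
  (PySem.List.pyRange 1 (PySem.List.len (PySem.List.pyGetD tbl_b 0 [])) 1).foldl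
    (fun acc _ => acc ++ [""]) []

def left_join_tables (tbl_a : List (List String)) (tbl_b : List (List String)) : List (List String) :=
  (PySem.List.slice tbl_a (some 1) none).foldl
    (fun tbl_c row =>
      let main_id_a := PySem.List.pyGetD row 0 ""
      if (ljtMap tbl_b).contains main_id_a then
        ((ljtMap tbl_b).getD main_id_a []).foldl
          (fun acc i => acc ++ [row ++ PySem.List.slice (PySem.List.pyGetD tbl_b i []) (some 1) none])
          tbl_c
      else tbl_c ++ [row ++ ljtEmptyRow tbl_b])
    [PySem.List.pyGetD tbl_a 0 [] ++ PySem.List.slice (PySem.List.pyGetD tbl_b 0 []) (some 1) none]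

-- ===== PORT B =====
def left_join_tables_alt (tbl_a : List (List String)) (tbl_b : List (List String)) : List (List String) :=
  let width := (PySem.List.pyGetD tbl_b 0 []).length - 1
  (PySem.List.slice tbl_a (some 1) none).foldl
    (fun tbl_c row =>
      let res := tbl_b.foldl
        (fun (p : List (List String) × Bool) b_row =>
          if PySem.List.pyGetD b_row 0 "" == PySem.List.pyGetD row 0 "" then
            (p.1 ++ [row ++ PySem.List.slice b_row (some 1) none], true)
          else p)
        (tbl_c, false)
      if res.2 then res.1 else res.1 ++ [row ++ List.replicate width ""])
    [PySem.List.pyGetD tbl_a 0 [] ++ PySem.List.slice (PySem.List.pyGetD tbl_b 0 []) (some 1) none]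

-- ===== PRECONDITION & SPEC =====
-- Pre_ excludes exactly the inputs on which the Python A raises IndexError: empty tbl_a or tbl_b
-- (tbl_a[0] / tbl_b[0]), an empty row in tbl_b (tbl_b[i][0]), or an empty data row of tbl_a (row[0]).
def Pre_left_join_tables (tbl_a : List (List String)) (tbl_b : List (List String)) : Prop :=
  tbl_a ≠ [] ∧ tbl_b ≠ [] ∧ (∀ r ∈ tbl_b, r ≠ []) ∧ (∀ r ∈ tbl_a.tail, r ≠ [])
instance (tbl_a : List (List String)) (tbl_b : List (List String)) : Decidable (Pre_left_join_tables tbl_a tbl_b) := by unfold Pre_left_join_tables; infer_instance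

def pvWitness_left_join_tables : List (List String) × List (List String) :=
  ([["id", "a"], ["1", "x"], ["2", "y"]], [["id", "b"], ["1", "u"], ["1", "v"]])

def Spec_left_join_tables (tbl_a : List (List String)) (tbl_b : List (List String)) (out : List (List String)) : Prop := out = left_join_tables_alt tbl_a tbl_b
instance (tbl_a : List (List String)) (tbl_b : List (List String)) (out : List (List String)) : Decidable (Spec_left_join_tables tbl_a tbl_b out) := by unfold Spec_left_join_tables; infer_instance

-- ===== CLAIM (what is proved, stated in full; the proofs are below) =====
def Claim_equal_left_join_tables : Prop := ∀ (tbl_a : List (List String)) (tbl_b : List (List String)), Dom_left_join_tables tbl_a tbl_b → Pre_left_join_tables tbl_a tbl_b → Spec_left_join_tables tbl_a tbl_b (left_join_tables tbl_a tbl_b)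

-- ===== LEMMAS AND PROOFS =====

-- A's dict build, re-expressed as a pair fold over enumerate(tbl_b)
theorem ljtMap_eq_enum (L : List (List String)) :
    ljtMap L = ((PySem.List.enumerate L 0).map (fun p => (PySem.List.pyGetD p.2 0 "", p.1))).foldl
      (fun d q => d.modify q.1 [] (· ++ [q.2])) PySem.Dict.empty := by
  unfold ljtMap
  rw [PySem.List.enumerate_eq_map_pyRange L ([] : List String)]
  rw [List.map_map, List.foldl_map]
  rfl

theorem ljtMap_getD (L : List (List String)) (k : String) :
    (ljtMap L).getD k [] =
      ((PySem.List.enumerate L 0).filter (fun p => PySem.List.pyGetD p.2 0 "" == k)).map (·.1) := by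
  rw [ljtMap_eq_enum, PySem.Dict.getD_foldl_modify_append]
  simp [List.filter_map, List.map_map, Function.comp_def]

theorem ljtMap_keys (L : List (List String)) :
    (ljtMap L).keys = PySem.Set.ofList ((PySem.List.enumerate L 0).map
      (fun p => PySem.List.pyGetD p.2 0 "")) := by
  have hkeys := PySem.Dict.keys_foldl_modify_key
    (l := (PySem.List.enumerate L 0).map (fun p => (PySem.List.pyGetD p.2 0 "", p.1)))
    (key := fun q => q.1) (d0 := ([] : List Int)) (f := fun _ q v => v ++ [q.2])
    (d := PySem.Dict.empty)
  rw [ljtMap_eq_enum]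
  rw [hkeys]
  simp [PySem.Dict.keys_empty, PySem.Set.update_nil_left, List.map_map, Function.comp_def]

theorem ljtMap_contains (L : List (List String)) (k : String) :
    (ljtMap L).contains k = L.any (fun b => PySem.List.pyGetD b 0 "" == k) := by
  have hmem : k ∈ (ljtMap L).keys ↔ ∃ b ∈ L, PySem.List.pyGetD b 0 "" = k := by
    rw [ljtMap_keys]
    rw [PySem.Set.mem_ofList]
    constructor
    · intro h
      obtain ⟨p, hp, hk⟩ := List.mem_map.mp h
      have h2 : p.2 ∈ L := by
        have := List.mem_map_of_mem (f := (·.2)) hp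
        rwa [PySem.List.map_snd_enumerate] at this
      exact ⟨p.2, h2, hk⟩
    · rintro ⟨b, hb, rfl⟩
      apply List.mem_map.mpr
      obtain ⟨j, hj, rfl⟩ := List.mem_iff_getElem.mp hb
      exact ⟨((0 : Int) + j, L[j]), (PySem.List.mem_enumerate_iff _ _ _).mpr ⟨j, hj, rfl⟩, rfl⟩
  by_cases h : k ∈ (ljtMap L).keys
  · rw [(PySem.Dict.contains_iff_mem_keys _ _).mpr h]
    obtain ⟨b, hb, hk⟩ := hmem.mp h
    exact (List.any_eq_true.mpr ⟨b, hb, by simp [hk]⟩).symm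
  · have hc : (ljtMap L).contains k = false := by
      rcases hb : (ljtMap L).contains k with _ | _
      · rfl
      · exact absurd ((PySem.Dict.contains_iff_mem_keys _ _).mp hb) h
    rw [hc]
    symm
    rw [List.any_eq_false]
    intro b hb hbk
    exact h (hmem.mpr ⟨b, hb, by simpa using hbk⟩)

-- every pair of enumerate(L) indexes its own row
theorem pyGetD_of_mem_enumerate (L : List (List String)) (p : Int × List String)
    (hp : p ∈ PySem.List.enumerate L 0) : PySem.List.pyGetD L p.1 [] = p.2 := by
  obtain ⟨j, hj, rfl⟩ := (PySem.List.mem_enumerate_iff _ _ _).mp hp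
  simp [PySem.List.pyGetD_natCast, List.getD_eq_getElem?_getD, hj]

-- A's inner loop over the stored index list = a map over the matching rows of L
theorem ljtMap_fold (L : List (List String)) (k : String) (row : List String)
    (tbl_c : List (List String)) :
    ((ljtMap L).getD k []).foldl
        (fun acc i => acc ++ [row ++ PySem.List.slice (PySem.List.pyGetD L i []) (some 1) none]) tbl_c
      = tbl_c ++ (L.filter (fun b => PySem.List.pyGetD b 0 "" == k)).map
          (fun b => row ++ PySem.List.slice b (some 1) none) := by
  rw [ljtMap_getD, PySem.List.foldl_append_singleton_eq_map, List.map_map]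
  congr 1
  have hmc : ∀ p ∈ (PySem.List.enumerate L 0).filter (fun p => PySem.List.pyGetD p.2 0 "" == k),
      ((fun i => row ++ PySem.List.slice (PySem.List.pyGetD L i []) (some 1) none) ∘ (·.1)) p
        = row ++ PySem.List.slice p.2 (some 1) none := by
    intro p hp
    simp only [Function.comp]
    rw [pyGetD_of_mem_enumerate L p (List.mem_of_mem_filter hp)]
  rw [List.map_congr_left hmc]
  have hsnd := List.filter_map (f := fun (x : Int × List String) => x.2)
    (l := PySem.List.enumerate L 0) (p := fun b => PySem.List.pyGetD b 0 "" == k)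
  rw [PySem.List.map_snd_enumerate] at hsnd
  rw [hsnd, List.map_map]
  rfl

-- A's empty_row is width-many ""
theorem ljtEmptyRow_eq (tbl_b : List (List String)) :
    ljtEmptyRow tbl_b = List.replicate ((PySem.List.pyGetD tbl_b 0 []).length - 1) "" := by
  unfold ljtEmptyRow
  rw [PySem.List.foldl_append_singleton_eq_map (f := fun _ => "")]
  rw [List.eq_replicate_iff]
  refine ⟨?_, by simp⟩
  simp [PySem.List.length_pyRange_one]

-- B's inner scan of tbl_b, with its matched flag
theorem alt_inner (L : List (List String)) (row : List String) :
    ∀ (acc : List (List String)) (flag : Bool),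
      L.foldl (fun (p : List (List String) × Bool) b_row =>
          if PySem.List.pyGetD b_row 0 "" == PySem.List.pyGetD row 0 "" then
            (p.1 ++ [row ++ PySem.List.slice b_row (some 1) none], true)
          else p) (acc, flag)
      = (acc ++ (L.filter (fun b => PySem.List.pyGetD b 0 "" == PySem.List.pyGetD row 0 "")).map
            (fun b => row ++ PySem.List.slice b (some 1) none),
         flag || L.any (fun b => PySem.List.pyGetD b 0 "" == PySem.List.pyGetD row 0 "")) := by
  induction L with
  | nil => intro acc flag; simp
  | cons b L ih =>
    intro acc flag
    simp only [List.foldl_cons, List.filter_cons, List.any_cons]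
    by_cases hb : (PySem.List.pyGetD b 0 "" == PySem.List.pyGetD row 0 "") = true
    · rw [if_pos hb, ih, hb]
      simp
    · rw [if_neg hb, ih]
      simp only [Bool.not_eq_true] at hb
      rw [hb]
      simp

-- per-row agreement of the two loop bodies
theorem row_step_eq (tbl_b : List (List String)) (tbl_c : List (List String)) (row : List String) :
    (if (ljtMap tbl_b).contains (PySem.List.pyGetD row 0 "") then
        ((ljtMap tbl_b).getD (PySem.List.pyGetD row 0 "") []).foldl
          (fun acc i => acc ++ [row ++ PySem.List.slice (PySem.List.pyGetD tbl_b i []) (some 1) none])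
          tbl_c
      else tbl_c ++ [row ++ ljtEmptyRow tbl_b])
    = (let res := tbl_b.foldl
          (fun (p : List (List String) × Bool) b_row =>
            if PySem.List.pyGetD b_row 0 "" == PySem.List.pyGetD row 0 "" then
              (p.1 ++ [row ++ PySem.List.slice b_row (some 1) none], true)
            else p) (tbl_c, false)
        if res.2 then res.1
        else res.1 ++ [row ++ List.replicate ((PySem.List.pyGetD tbl_b 0 []).length - 1) ""]) := by
  rw [alt_inner tbl_b row tbl_c false]
  rw [ljtMap_contains]
  by_cases h : tbl_b.any (fun b => PySem.List.pyGetD b 0 "" == PySem.List.pyGetD row 0 "") = true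
  · rw [ljtMap_fold]
    simp [h]
  · simp only [Bool.not_eq_true] at h
    have hf : tbl_b.filter (fun b => PySem.List.pyGetD b 0 "" == PySem.List.pyGetD row 0 "") = [] := by
      rw [List.filter_eq_nil_iff]
      exact List.any_eq_false.mp h
    simp [h, hf, ljtEmptyRow_eq]

-- ===== VERDICT (by name: the statement is the Claim_ definition above) =====
theorem left_join_tables_spec : Claim_equal_left_join_tables := by
  intro tbl_a tbl_b _ _
  unfold Spec_left_join_tables left_join_tables left_join_tables_alt
  apply PySem.List.foldl_congr_mem
  intro acc row _
  exact row_step_eq tbl_b acc row
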